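-- pv_equiv track=rewrite | github.com/echo-xiao/leetcode-journey | Problems/1074_high-five/solution_1.py | highFive
-- ===== SOURCE A (Python) =====
-- from typing import List
--
-- import heapq
--
-- def highFive(items: List[List[int]]) -> List[List[int]]:
--
--
--     students = {}
--
--     for idx, score in items:
--         if idx not in students:
--             students[idx] = []
--
--         heap = students[idx]
--
--         if len(heap) < 5:
--             heapq.heappush(heap, score)
--         elif score > heap[0]:
--             heapq.heappushpop(heap, score)
--
--     res = []
--     for idx, heap in students.items():
--         avg = sum(heap) // 5
--         res.append([idx, avg])
--
--     res.sort()
--     return res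
-- ===== SOURCE B (Python) =====
-- from typing import List
-- from collections import defaultdict
--
-- def highFive(items: List[List[int]]) -> List[List[int]]:
--     scores = defaultdict(list)
--     for idx, score in items:
--         scores[idx].append(score)
--     res = [[idx, sum(sorted(s, reverse=True)[:5]) // 5] for idx, s in scores.items()]
--     res.sort()
--     return res
-- ===== Notes on version B (the rewrite author's own statement) =====
-- stated objective: simpler
-- what changed: B replaces A's per-student size-5 min-heap maintained online with hand-rolled heapq operations by simply collecting every score per student into a defaultdict(list) and then, per student, sorting the scores descending and summing the first five.
import Mathlib
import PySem

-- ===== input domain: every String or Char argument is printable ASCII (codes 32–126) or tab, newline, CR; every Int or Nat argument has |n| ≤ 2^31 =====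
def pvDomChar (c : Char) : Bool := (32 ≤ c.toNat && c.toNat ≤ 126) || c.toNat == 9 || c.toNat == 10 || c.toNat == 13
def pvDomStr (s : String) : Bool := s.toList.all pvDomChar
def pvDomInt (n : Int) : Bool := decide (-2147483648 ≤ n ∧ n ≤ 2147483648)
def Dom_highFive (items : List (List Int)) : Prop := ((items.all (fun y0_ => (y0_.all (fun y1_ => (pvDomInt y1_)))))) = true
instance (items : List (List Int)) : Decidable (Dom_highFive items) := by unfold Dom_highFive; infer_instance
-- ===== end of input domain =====

-- B replaces A's per-student capped min-heap (hand-ported heapq) by collect-all-scores-then-sort-desc-take-5;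
-- objective: simpler. A mutates the inner heap lists it stores; equivalence here is about the return value only.

-- ===== PORT A =====
-- literal port of CPython's heapq._siftdown while-loop (pos moves to the parent)
def pvSiftdownLoop (heap : List Int) (startpos pos : Nat) (newitem : Int) : List Int × Nat :=
  if _h : startpos < pos then
    let parentpos := (pos - 1) / 2
    let parent := heap.getD parentpos 0
    if newitem < parent then
      pvSiftdownLoop (heap.set pos parent) startpos parentpos newitem
    else (heap, pos)
  else (heap, pos)
termination_by pos
decreasing_by omega

-- heapq._siftdown (indices are in range at every call site, so getD 0 is exact)
def pvSiftdown (heap : List Int) (startpos pos : Nat) : List Int :=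
  let newitem := heap.getD pos 0
  let r := pvSiftdownLoop heap startpos pos newitem
  r.1.set r.2 newitem

-- heapq.heappush
def pvHeappush (heap : List Int) (item : Int) : List Int :=
  pvSiftdown (heap ++ [item]) 0 heap.length

-- literal port of CPython's heapq._siftup while-loop (pos moves to the smaller child)
def pvSiftupLoop (heap : List Int) (pos : Nat) : List Int × Nat :=
  let endpos := heap.length
  let childpos := 2*pos+1
  if _h : childpos < endpos then
    let rightpos := childpos + 1
    let childpos2 := if rightpos < endpos ∧ ¬ (heap.getD childpos 0 < heap.getD rightpos 0) then rightpos else childpos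
    pvSiftupLoop (heap.set pos (heap.getD childpos2 0)) childpos2
  else (heap, pos)
termination_by heap.length - pos
decreasing_by simp only [List.length_set]; split_ifs <;> omega

-- heapq._siftup (records newitem = heap[pos], runs the loop, writes newitem back, then _siftdown)
def pvSiftup (heap : List Int) (pos : Nat) : List Int :=
  let startpos := pos
  let newitem := heap.getD pos 0
  let r := pvSiftupLoop heap pos
  pvSiftdown (r.1.set r.2 newitem) startpos r.2

-- heapq.heappushpop, heap effect only (A discards its return value)
def pvHeappushpop (heap : List Int) (item : Int) : List Int :=
  if heap ≠ [] ∧ heap.getD 0 0 < item then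
    pvSiftup (heap.set 0 item) 0
  else heap

-- A's loop body for one item [idx, score]; items of other lengths raise in Python (excluded by Pre_)
def pvStepA (d : PySem.Dict Int (List Int)) (it : List Int) : PySem.Dict Int (List Int) :=
  match it with
  | [idx, score] =>
    let d1 := if d.contains idx then d else d.insert idx []
    let heap := d1.getD idx []
    if heap.length < 5 then d1.insert idx (pvHeappush heap score)
    else if heap.getD 0 0 < score then d1.insert idx (pvHeappushpop heap score)
    else d1
  | _ => d

def highFive (items : List (List Int)) : List (List Int) :=
  let students := items.foldl pvStepA PySem.Dict.empty
  let res := students.items.foldl (fun r p => r ++ [[p.1, PySem.Int.floordiv p.2.sum 5]]) []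
  PySem.List.sorted res (fun x => x) false

-- ===== PORT B =====
-- sorted(s, reverse=True)
def pvSortDesc (l : List Int) : List Int := PySem.List.sorted l (fun x => x) true

-- B's loop body: scores[idx].append(score) on a defaultdict(list)
def pvStepB (d : PySem.Dict Int (List Int)) (it : List Int) : PySem.Dict Int (List Int) :=
  match it with
  | [idx, score] => d.modify idx [] (fun s => s ++ [score])
  | _ => d

def highFive_alt (items : List (List Int)) : List (List Int) :=
  let scores := items.foldl pvStepB PySem.Dict.empty
  -- s[:5] on the sorted copy is take 5 (exact: nonnegative bound)
  let res := scores.items.map (fun p => [p.1, PySem.Int.floordiv ((pvSortDesc p.2).take 5).sum 5])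
  PySem.List.sorted res (fun x => x) false

-- ===== PRECONDITION & SPEC =====
-- Pre_ excludes inner lists whose length is not 2: Python's 'for idx, score in items' raises ValueError there.
def Pre_highFive (items : List (List Int)) : Prop := ∀ l ∈ items, l.length = 2
instance (items : List (List Int)) : Decidable (Pre_highFive items) := by unfold Pre_highFive; infer_instance
def pvWitness_highFive : List (List Int) := [[1, 91], [1, 92], [2, 93], [1, 60], [1, 70], [1, 80], [1, 65]]

def Spec_highFive (items : List (List Int)) (out : List (List Int)) : Prop := out = highFive_alt items
instance (items : List (List Int)) (out : List (List Int)) : Decidable (Spec_highFive items out) := by unfold Spec_highFive; infer_instance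

-- ===== CLAIM (what is proved, stated in full; the proofs are below) =====
def Claim_equal_highFive : Prop := ∀ (items : List (List Int)), Dom_highFive items → Pre_highFive items → Spec_highFive items (highFive items)

-- ===== LEMMAS AND PROOFS =====
theorem sdl_stop (l : List Int) (s : Nat) (n : Int) : pvSiftdownLoop l s s n = (l, s) := by
  rw [pvSiftdownLoop]; simp

theorem sdl1 (v0 v1 v2 v3 v4 n : Int) : pvSiftdownLoop [v0,v1,v2,v3,v4] 0 1 n =
    if n < v0 then ([v0,v0,v2,v3,v4], 0) else ([v0,v1,v2,v3,v4], 1) := by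
  rw [pvSiftdownLoop]; norm_num [sdl_stop]

theorem sdl2 (v0 v1 v2 v3 v4 n : Int) : pvSiftdownLoop [v0,v1,v2,v3,v4] 0 2 n =
    if n < v0 then ([v0,v1,v0,v3,v4], 0) else ([v0,v1,v2,v3,v4], 2) := by
  rw [pvSiftdownLoop]; norm_num [sdl_stop]

theorem sdl3 (v0 v1 v2 v3 v4 n : Int) : pvSiftdownLoop [v0,v1,v2,v3,v4] 0 3 n =
    if n < v1 then (if n < v0 then ([v0,v0,v2,v1,v4], 0) else ([v0,v1,v2,v1,v4], 1)) else ([v0,v1,v2,v3,v4], 3) := by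
  rw [pvSiftdownLoop]; norm_num [sdl1]

theorem sdl4 (v0 v1 v2 v3 v4 n : Int) : pvSiftdownLoop [v0,v1,v2,v3,v4] 0 4 n =
    if n < v1 then (if n < v0 then ([v0,v0,v2,v3,v1], 0) else ([v0,v1,v2,v3,v1], 1)) else ([v0,v1,v2,v3,v4], 4) := by
  rw [pvSiftdownLoop]; norm_num [sdl1]

theorem sul2 (v0 v1 v2 v3 v4 : Int) : pvSiftupLoop [v0,v1,v2,v3,v4] 2 = ([v0,v1,v2,v3,v4], 2) := by
  rw [pvSiftupLoop]; norm_num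


theorem sul1 (v0 v1 v2 v3 v4 : Int) : pvSiftupLoop [v0,v1,v2,v3,v4] 1 =
    if v3 < v4 then ([v0,v3,v2,v3,v4], 3) else ([v0,v4,v2,v3,v4], 4) := by
  rw [pvSiftupLoop]; norm_num
  split_ifs with h1 h2 <;> (try (rw [pvSiftupLoop]; norm_num)) <;> (try omega) <;> simp_all


theorem sul0 (v0 v1 v2 v3 v4 : Int) : pvSiftupLoop [v0,v1,v2,v3,v4] 0 =
    if v1 < v2 then (if v3 < v4 then ([v1,v3,v2,v3,v4], 3) else ([v1,v4,v2,v3,v4], 4))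
    else ([v2,v1,v2,v3,v4], 2) := by
  rw [pvSiftupLoop]; norm_num
  split_ifs with h1 h2 <;> (try (rw [sul1])) <;> (try (rw [sul2])) <;> (try norm_num) <;>
    (try split_ifs) <;> (first | rfl | omega | (exfalso; omega))
def IsHeap5 : List Int → Prop
  | [] => True
  | [_] => True
  | [a,b] => a ≤ b
  | [a,b,c] => a ≤ b ∧ a ≤ c
  | [a,b,c,d] => a ≤ b ∧ a ≤ c ∧ b ≤ d
  | [a,b,c,d,e] => a ≤ b ∧ a ≤ c ∧ b ≤ d ∧ b ≤ e
  | _ => False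


set_option maxRecDepth 4000 in
theorem pushpop5 (a b c d e x : Int) (h : IsHeap5 [a,b,c,d,e]) (hx : a < x) :
    IsHeap5 (pvHeappushpop [a,b,c,d,e] x) ∧ (pvHeappushpop [a,b,c,d,e] x).Perm [x,b,c,d,e] := by
  simp only [IsHeap5] at h
  rw [pvHeappushpop,
      if_pos (show ¬([a,b,c,d,e] : List Int) = [] ∧ ([a,b,c,d,e] : List Int).getD 0 0 < x from
        ⟨by simp, by simpa using hx⟩),
      List.set_cons_zero]
  simp only [pvSiftup]
  rw [sul0]
  norm_num
  split_ifs with h1 h2 <;> simp only [pvSiftdown] <;> norm_num <;>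
    (first | rw [sdl3] | rw [sdl4] | rw [sdl2]) <;> norm_num <;>
    (try split_ifs)
  all_goals
    (refine ⟨by simp [IsHeap5, List.set]; omega, ?_⟩)
  all_goals
    (simp [List.set]; try (rw [List.perm_iff_count]; intro y; simp [List.count_cons]; split_ifs <;> omega))
def insD (x : Int) : List Int → List Int
  | [] => [x]
  | y :: ys => if y < x then x :: y :: ys else y :: insD x ys

theorem insD_perm (x : Int) (l : List Int) : (insD x l).Perm (x :: l) := by
  induction l with
  | nil => simp [insD]
  | cons y ys ih =>
    rw [insD]
    split_ifs
    · exact List.Perm.refl _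
    · exact (ih.cons y).trans (List.Perm.swap x y ys)

theorem length_insD (x : Int) (l : List Int) : (insD x l).length = l.length + 1 :=
  (insD_perm x l).length_eq

theorem insD_pairwise (x : Int) (l : List Int) (h : l.Pairwise (fun a b => b ≤ a)) :
    (insD x l).Pairwise (fun a b => b ≤ a) := by
  induction l with
  | nil => simp [insD]
  | cons y ys ih =>
    rw [insD]
    rcases List.pairwise_cons.mp h with ⟨hy, hys⟩
    split_ifs with hlt
    · refine List.pairwise_cons.mpr ⟨?_, h⟩
      intro z hz
      rcases List.mem_cons.mp hz with rfl | hz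
      · omega
      · exact le_of_lt (lt_of_le_of_lt (hy _ hz) hlt)
    · refine List.pairwise_cons.mpr ⟨?_, ih hys⟩
      intro z hz
      rcases List.mem_cons.mp ((insD_perm x ys).mem_iff.mp hz) with rfl | hz
      · omega
      · exact hy _ hz

theorem sortD_perm (l : List Int) : (pvSortDesc l).Perm l := PySem.List.sorted_perm l _ true

theorem sortD_pairwise (l : List Int) : (pvSortDesc l).Pairwise (fun a b => b ≤ a) :=
  PySem.List.sorted_pairwise_rev l (fun x => x)

theorem sortD_unique (l u : List Int) (hp : u.Perm l) (hs : u.Pairwise (fun a b => b ≤ a)) :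
    pvSortDesc l = u := by
  have hperm : (pvSortDesc l).Perm u := (sortD_perm l).trans hp.symm
  exact hperm.eq_of_pairwise (fun a b _ _ h1 h2 => le_antisymm h2 h1) (sortD_pairwise l) hs

theorem sortD_snoc (s : List Int) (x : Int) :
    pvSortDesc (s ++ [x]) = insD x (pvSortDesc s) :=
  sortD_unique _ _
    ((insD_perm x _).trans (((sortD_perm s).cons x).trans (List.perm_append_singleton x s).symm))
    (insD_pairwise x _ (sortD_pairwise s))

theorem insD_append_of_exists (x : Int) (t r : List Int) (h : ∃ y ∈ t, y < x) :
    insD x (t ++ r) = insD x t ++ r := by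
  induction t with
  | nil => simp at h
  | cons y ys ih =>
    rcases h with ⟨z, hz, hzx⟩
    rw [List.cons_append, insD, insD]
    split_ifs with hlt
    · simp
    · rcases List.mem_cons.mp hz with rfl | hz
      · omega
      · rw [ih ⟨z, hz, hzx⟩]; simp

theorem insD_append_of_forall (x : Int) (t r : List Int) (h : ∀ y ∈ t, ¬ y < x) :
    insD x (t ++ r) = t ++ insD x r := by
  induction t with
  | nil => simp
  | cons y ys ih =>
    rw [List.cons_append, insD]
    split_ifs with hlt
    · exact absurd hlt (h y (by simp))
    · rw [ih (fun z hz => h z (by simp [hz]))]; simp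

theorem getLast_le_of_pairwise (l : List Int) (hne : l ≠ [])
    (h : l.Pairwise (fun a b => b ≤ a)) : ∀ y ∈ l, l.getLast hne ≤ y := by
  induction l with
  | nil => simp at hne
  | cons y ys ih =>
    rcases List.pairwise_cons.mp h with ⟨hy, hys⟩
    intro z hz
    by_cases hys_nil : ys = []
    · subst hys_nil; simp at hz; subst hz; simp
    · rw [List.getLast_cons hys_nil]
      rcases List.mem_cons.mp hz with rfl | hz
      · exact le_trans (ih hys_nil hys _ (List.getLast_mem hys_nil)) (hy _ (List.getLast_mem hys_nil))
      · exact ih hys_nil hys _ hz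

theorem take_len_insD (t : List Int) (x : Int) (ht : t ≠ [])
    (hmin : ∀ y ∈ t, t.getLast ht ≤ y) (hx : t.getLast ht < x) :
    ((insD x t).take t.length).Perm (x :: t.dropLast) := by
  induction t with
  | nil => simp at ht
  | cons y ys ih =>
    by_cases hys : ys = []
    · subst hys
      simp only [List.getLast_singleton] at hx
      simp [insD, hx]
    · rw [insD]
      split_ifs with hlt
      · have hlen : (y :: ys).length = (x :: y :: ys).length - 1 := by simp
        rw [hlen, ← List.dropLast_eq_take, List.dropLast_cons_of_ne_nil (by simp),
            List.dropLast_cons_of_ne_nil hys]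
      · rw [List.length_cons, List.take_succ_cons]
        rw [List.dropLast_cons_of_ne_nil hys]
        have hlast : (y :: ys).getLast ht = ys.getLast hys := List.getLast_cons hys
        refine List.Perm.trans (List.Perm.cons y (ih hys ?_ ?_)) (List.Perm.swap x y _)
        · intro z hz; rw [← hlast]; exact hmin z (by simp [hz])
        · rw [← hlast]; exact hx

set_option maxRecDepth 10000 in
theorem push0 (x : Int) : IsHeap5 (pvHeappush [] x) ∧ (pvHeappush [] x).Perm [x] := by
  constructor <;> simp [pvHeappush, pvSiftdown, pvSiftdownLoop, IsHeap5]

set_option maxRecDepth 10000 in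
theorem push1 (a x : Int) (h : IsHeap5 [a]) : IsHeap5 (pvHeappush [a] x) ∧ (pvHeappush [a] x).Perm [x, a] := by
  simp only [pvHeappush, pvSiftdown]
  rw [pvSiftdownLoop]; norm_num
  repeat' (first | (rw [pvSiftdownLoop]; norm_num) | split_ifs)
  all_goals norm_num
  all_goals (first
    | (simp only [IsHeap5]; omega)
    | (constructor
       · simp only [IsHeap5]; omega
       · rw [List.perm_iff_count]; intro y; simp [List.count_cons]; split_ifs <;> omega)
    | (rw [List.perm_iff_count]; intro y; simp [List.count_cons]; split_ifs <;> omega))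

set_option maxRecDepth 10000 in
theorem push2 (a b x : Int) (h : IsHeap5 [a,b]) :
    IsHeap5 (pvHeappush [a,b] x) ∧ (pvHeappush [a,b] x).Perm [x,a,b] := by
  simp only [IsHeap5] at h
  simp only [pvHeappush, pvSiftdown]
  rw [pvSiftdownLoop]; norm_num
  repeat' (first | (rw [pvSiftdownLoop]; norm_num) | split_ifs)
  all_goals norm_num
  all_goals (first
    | (simp only [IsHeap5]; omega)
    | (constructor
       · simp only [IsHeap5]; omega
       · rw [List.perm_iff_count]; intro y; simp [List.count_cons]; split_ifs <;> omega)
    | (rw [List.perm_iff_count]; intro y; simp [List.count_cons]; split_ifs <;> omega))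

set_option maxRecDepth 10000 in
theorem push3 (a b c x : Int) (h : IsHeap5 [a,b,c]) :
    IsHeap5 (pvHeappush [a,b,c] x) ∧ (pvHeappush [a,b,c] x).Perm [x,a,b,c] := by
  simp only [IsHeap5] at h
  simp only [pvHeappush, pvSiftdown]
  rw [pvSiftdownLoop]; norm_num
  repeat' (first | (rw [pvSiftdownLoop]; norm_num) | split_ifs)
  all_goals norm_num
  all_goals (first
    | (simp only [IsHeap5]; omega)
    | (constructor
       · simp only [IsHeap5]; omega
       · rw [List.perm_iff_count]; intro y; simp [List.count_cons]; split_ifs <;> omega)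
    | (rw [List.perm_iff_count]; intro y; simp [List.count_cons]; split_ifs <;> omega))

set_option maxRecDepth 10000 in
theorem push4 (a b c d x : Int) (h : IsHeap5 [a,b,c,d]) :
    IsHeap5 (pvHeappush [a,b,c,d] x) ∧ (pvHeappush [a,b,c,d] x).Perm [x,a,b,c,d] := by
  simp only [IsHeap5] at h
  simp only [pvHeappush, pvSiftdown]
  rw [pvSiftdownLoop]; norm_num
  repeat' (first | (rw [pvSiftdownLoop]; norm_num) | split_ifs)
  all_goals norm_num
  all_goals (first
    | (simp only [IsHeap5]; omega)
    | (constructor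
       · simp only [IsHeap5]; omega
       · rw [List.perm_iff_count]; intro y; simp [List.count_cons]; split_ifs <;> omega)
    | (rw [List.perm_iff_count]; intro y; simp [List.count_cons]; split_ifs <;> omega))


theorem step_inv (heap s : List Int) (x : Int) (hH : IsHeap5 heap)
    (hp : heap.Perm ((pvSortDesc s).take 5)) :
    IsHeap5 (if heap.length < 5 then pvHeappush heap x
             else if heap.getD 0 0 < x then pvHeappushpop heap x else heap) ∧
    (if heap.length < 5 then pvHeappush heap x
     else if heap.getD 0 0 < x then pvHeappushpop heap x else heap).Perm
      ((pvSortDesc (s ++ [x])).take 5) := by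
  rw [sortD_snoc]
  set u := pvSortDesc s with hu
  have hlen5 : heap.length ≤ 5 := by rw [hp.length_eq, List.length_take]; omega
  by_cases hsmall : heap.length < 5
  · rw [if_pos hsmall]
    have humin : u.length < 5 := by have := hp.length_eq; rw [List.length_take] at this; omega
    have htu : u.take 5 = u := List.take_of_length_le (by omega)
    rw [htu] at hp
    have htiu : (insD x u).take 5 = insD x u := List.take_of_length_le (by rw [length_insD]; omega)
    rw [htiu]
    have hfin : ∀ (res : List Int), IsHeap5 res → res.Perm (x :: heap) →
        IsHeap5 res ∧ res.Perm (insD x u) := by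
      intro res h1 h2
      exact ⟨h1, (h2.trans (hp.cons x)).trans (insD_perm x u).symm⟩
    rcases heap with _|⟨a0,_|⟨a1,_|⟨a2,_|⟨a3,_|⟨a4,rest⟩⟩⟩⟩⟩
    · obtain ⟨h1, h2⟩ := push0 x; exact hfin _ h1 h2
    · obtain ⟨h1, h2⟩ := push1 a0 x hH; exact hfin _ h1 h2
    · obtain ⟨h1, h2⟩ := push2 a0 a1 x hH; exact hfin _ h1 h2
    · obtain ⟨h1, h2⟩ := push3 a0 a1 a2 x hH; exact hfin _ h1 h2
    · obtain ⟨h1, h2⟩ := push4 a0 a1 a2 a3 x hH; exact hfin _ h1 h2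
    · exfalso; simp at hsmall; omega
  · rw [if_neg hsmall]
    rcases heap with _|⟨a,_|⟨b,_|⟨c,_|⟨d,_|⟨e,_|⟨f,rest⟩⟩⟩⟩⟩⟩
    · exact absurd (by simp) hsmall
    · exact absurd (by simp) hsmall
    · exact absurd (by simp) hsmall
    · exact absurd (by simp) hsmall
    · exact absurd (by simp) hsmall
    case neg.cons.cons.cons.cons.cons.cons => exfalso; simp at hlen5; omega
    case neg.cons.cons.cons.cons.cons.nil =>
    have hmem_a : ∀ y ∈ ([a,b,c,d,e] : List Int), a ≤ y := by
      intro y hy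
      simp only [IsHeap5] at hH
      simp at hy
      rcases hy with rfl|rfl|rfl|rfl|rfl <;> omega
    set t := u.take 5 with htdef
    have htlen : t.length = 5 := by have := hp.length_eq; simp at this; omega
    have htne : t ≠ [] := by intro h0; rw [h0] at htlen; simp at htlen
    have htpair : t.Pairwise (fun a b => b ≤ a) := (sortD_pairwise s).sublist (List.take_sublist 5 u)
    have hmint : ∀ y ∈ t, t.getLast htne ≤ y := getLast_le_of_pairwise t htne htpair
    have hat : a ∈ t := hp.subset (by simp)
    have hlast_mem : t.getLast htne ∈ ([a,b,c,d,e] : List Int) := hp.symm.subset (List.getLast_mem htne)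
    have hma : t.getLast htne = a := le_antisymm (hmint a hat) (hmem_a _ hlast_mem)
    have hgd : ([a,b,c,d,e] : List Int).getD 0 0 = a := rfl
    have hsplit : u = t ++ u.drop 5 := (List.take_append_drop 5 u).symm
    by_cases hax : a < x
    · rw [if_pos (by simpa [hgd] using hax)]
      obtain ⟨h1, h2⟩ := pushpop5 a b c d e x hH hax
      refine ⟨h1, h2.trans ?_⟩
      have hins : insD x u = insD x t ++ u.drop 5 := by
        conv_lhs => rw [hsplit]
        exact insD_append_of_exists x t _ ⟨a, hat, hax⟩
      rw [hins, List.take_append_of_le_length (by rw [length_insD, htlen]; omega)]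
      have h5 : (5 : Nat) = t.length := htlen.symm
      rw [h5]
      refine List.Perm.trans ?_ (take_len_insD t x htne hmint (by rw [hma]; exact hax)).symm
      refine List.Perm.cons x ?_
      have htd : t.Perm (a :: t.dropLast) := by
        conv_lhs => rw [← List.dropLast_append_getLast htne, hma]
        exact List.perm_append_singleton a _
      exact (hp.trans htd).cons_inv
    · rw [if_neg (by simpa [hgd] using hax)]
      refine ⟨hH, hp.trans ?_⟩
      have hins : insD x u = t ++ insD x (u.drop 5) := by
        conv_lhs => rw [hsplit]
        exact insD_append_of_forall x t _ (fun y hy hlt => hax (by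
          have : a ≤ y := by rw [← hma]; exact hmint y hy
          omega))
      rw [hins, List.take_append_of_le_length (le_of_eq htlen.symm),
          List.take_of_length_le (le_of_eq htlen)]
def DInv (dA dB : PySem.Dict Int (List Int)) : Prop :=
  dA.keys = dB.keys ∧ dA.keys.Nodup ∧
  ∀ k : Int, IsHeap5 (dA.getD k []) ∧ (dA.getD k []).Perm ((pvSortDesc (dB.getD k [])).take 5)

theorem DInv_step (dA dB : PySem.Dict Int (List Int)) (it : List Int) (h : DInv dA dB) :
    DInv (pvStepA dA it) (pvStepB dB it) := by
  obtain ⟨hkeys, hnd, hinv⟩ := h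
  rcases it with _|⟨idx,_|⟨score,_|⟨z,zs⟩⟩⟩
  · exact ⟨hkeys, hnd, hinv⟩
  · exact ⟨hkeys, hnd, hinv⟩
  case cons.cons.nil =>
    simp only [pvStepA, pvStepB]
    have hcontains : dA.contains idx = dB.contains idx := by
      rw [PySem.Dict.contains_eq_decide_mem_keys, PySem.Dict.contains_eq_decide_mem_keys, hkeys]
    set d1 := if dA.contains idx then dA else dA.insert idx [] with hd1
    have hd1_getD : ∀ k : Int, d1.getD k [] = dA.getD k [] := by
      intro k
      rw [hd1]; split_ifs with hc
      · rfl
      · rw [PySem.Dict.getD_insert]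
        split_ifs with hk
        · subst hk; exact (PySem.Dict.getD_of_not_contains dA [] (by simpa using hc)).symm
        · rfl
    have hd1_keys : d1.keys = if dA.contains idx then dA.keys else dA.keys ++ [idx] := by
      rw [hd1]; split_ifs with hc
      · rfl
      · exact PySem.Dict.keys_insert_of_not_contains dA [] (by simpa using hc)
    have hd1_nd : d1.keys.Nodup := by
      rw [hd1_keys]; split_ifs with hc
      · exact hnd
      · simp only [List.nodup_append]
        refine ⟨hnd, List.nodup_singleton idx, ?_⟩
        intro a ha b hb
        simp only [List.mem_singleton] at hb
        subst hb
        intro heq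
        subst heq
        have hmem : ¬ a ∈ dA.keys := by simpa [PySem.Dict.contains_iff_mem_keys] using hc
        exact hmem ha
    have hd1_contains : d1.contains idx = true := by
      rw [hd1]; split_ifs with hc
      · exact hc
      · exact PySem.Dict.contains_insert_self dA idx []
    obtain ⟨hH, hp⟩ := hinv idx
    rw [← hd1_getD idx] at hH hp
    set heap := d1.getD idx [] with hheap
    obtain ⟨hH', hp'⟩ := step_inv heap (dB.getD idx []) score hH hp
    have hA_keys : (if heap.length < 5 then d1.insert idx (pvHeappush heap score)
        else if heap.getD 0 0 < score then d1.insert idx (pvHeappushpop heap score) else d1).keys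
        = d1.keys := by
      split_ifs <;>
        first
        | exact PySem.Dict.keys_insert_of_contains d1 _ hd1_contains
        | rfl
    have hB_keys : (dB.modify idx [] (fun s => s ++ [score])).keys
        = if dB.contains idx then dB.keys else dB.keys ++ [idx] := by
      rw [PySem.Dict.keys_modify]
      by_cases hcB : dB.contains idx = true
      · rw [PySem.Dict.keys_insert_of_contains dB _ hcB, if_pos hcB]
      · rw [PySem.Dict.keys_insert_of_not_contains dB _ (by simpa using hcB), if_neg hcB]
    refine ⟨?_, ?_, ?_⟩
    · rw [hA_keys, hB_keys, ← hcontains, ← hkeys, hd1_keys]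
    · rw [hA_keys]; exact hd1_nd
    · intro k
      by_cases hk : k = idx
      · subst hk
        have hA : (if heap.length < 5 then d1.insert k (pvHeappush heap score)
                   else if heap.getD 0 0 < score then d1.insert k (pvHeappushpop heap score) else d1).getD k []
            = (if heap.length < 5 then pvHeappush heap score
               else if heap.getD 0 0 < score then pvHeappushpop heap score else heap) := by
          split_ifs <;> first | simp [PySem.Dict.getD_insert_self] | rfl
        have hB : (dB.modify k [] (fun s => s ++ [score])).getD k [] = dB.getD k [] ++ [score] :=
          PySem.Dict.getD_modify_self dB k [] _
        rw [hA, hB]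
        exact ⟨hH', hp'⟩
      · have hA : (if heap.length < 5 then d1.insert idx (pvHeappush heap score)
                   else if heap.getD 0 0 < score then d1.insert idx (pvHeappushpop heap score) else d1).getD k []
            = dA.getD k [] := by
          split_ifs <;> rw [← hd1_getD k] <;>
            first
            | rw [PySem.Dict.getD_insert_of_ne d1 _ _ hk]
            | rfl
        have hB : (dB.modify idx [] (fun s => s ++ [score])).getD k [] = dB.getD k [] :=
          PySem.Dict.getD_modify_of_ne dB [] _ hk
        rw [hA, hB]
        exact hinv k
  case cons.cons.cons =>
    exact ⟨hkeys, hnd, hinv⟩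
theorem fold_DInv (items : List (List Int)) (dA dB : PySem.Dict Int (List Int)) (h : DInv dA dB) :
    DInv (items.foldl pvStepA dA) (items.foldl pvStepB dB) := by
  induction items generalizing dA dB with
  | nil => exact h
  | cons it rest ih => exact ih _ _ (DInv_step dA dB it h)

theorem foldl_append_eq_map {α β : Type} (f : α → β) (l : List α) (acc : List β) :
    l.foldl (fun r p => r ++ [f p]) acc = acc ++ l.map f := by
  induction l generalizing acc with
  | nil => simp
  | cons y ys ih => simp [ih]

theorem sortD_nil : pvSortDesc [] = [] := sortD_unique [] [] (List.Perm.refl _) (by simp)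

theorem DInv_empty : DInv PySem.Dict.empty PySem.Dict.empty := by
  refine ⟨rfl, by simp [PySem.Dict.keys_empty], ?_⟩
  intro k
  exact ⟨trivial, by rw [PySem.Dict.getD_empty, sortD_nil]; simp⟩

theorem highFive_eq_alt (items : List (List Int)) : highFive items = highFive_alt items := by
  simp only [highFive, highFive_alt]
  obtain ⟨hkeys, hnd, hinv⟩ := fold_DInv items _ _ DInv_empty
  have hndB : (items.foldl pvStepB PySem.Dict.empty).keys.Nodup := hkeys ▸ hnd
  refine congrArg (fun r => PySem.List.sorted r (fun x => x) false) ?_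
  rw [foldl_append_eq_map (fun p : Int × List Int => [p.1, PySem.Int.floordiv p.2.sum 5]),
      List.nil_append,
      PySem.Dict.items_eq_map_keys _ hnd [], PySem.Dict.items_eq_map_keys _ hndB [], hkeys,
      List.map_map, List.map_map]
  apply List.map_congr_left
  intro k _
  simp only [Function.comp]
  have hsum : ((items.foldl pvStepA PySem.Dict.empty).getD k []).sum
      = ((pvSortDesc ((items.foldl pvStepB PySem.Dict.empty).getD k [])).take 5).sum :=
    (hinv k).2.sum_eq
  rw [hsum]

-- ===== VERDICT (by name: the statement is the Claim_ definition above) =====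
theorem highFive_spec : Claim_equal_highFive := by
  intro items _ _
  unfold Spec_highFive
  exact highFive_eq_alt items
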